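-- pv_equiv track=rewrite | github.com/sonusario/ARCHIVE | The-Archive/_balancedTernaryAdder.py | triAddSO
-- ===== SOURCE A (Python) =====
-- def triAddSO(a,b,c):
-- 	sym = {'-':-1,'0':0,'+':1}
-- 	mys = {-1:'-',0:'0',1:'+'}
-- 	x = sym[a]
-- 	y = sym[b]
-- 	z = sym[c]
-- 	if x == y:
-- 		out = mys[-y]
-- 		carry = mys[x]
-- 	else:
-- 		out = mys[x+y]
-- 		carry = '0'
-- 	if z != 0:
-- 		i,out = triAddSO(out,c,'0')
-- 		j,carry = triAddSO(carry,i,'0')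
-- 	return carry,out
-- ===== SOURCE B (Python) =====
-- def triAddSO(a, b, c):
--     sym = {'-': -1, '0': 0, '+': 1}
--     mys = {-1: '-', 0: '0', 1: '+'}
--     total = sym[a] + sym[b] + sym[c]
--     return mys[(total + 1) // 3], mys[((total + 1) % 3) - 1]
-- ===== Notes on version B (the rewrite author's own statement) =====
-- stated objective: simpler
-- what changed: Replaces A's branch table plus double self-recursion for folding in the third trit by a single closed-form reduction: total = x+y+z, digit = ((total+1) % 3) - 1, carry = (total+1) // 3.
import Mathlib
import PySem

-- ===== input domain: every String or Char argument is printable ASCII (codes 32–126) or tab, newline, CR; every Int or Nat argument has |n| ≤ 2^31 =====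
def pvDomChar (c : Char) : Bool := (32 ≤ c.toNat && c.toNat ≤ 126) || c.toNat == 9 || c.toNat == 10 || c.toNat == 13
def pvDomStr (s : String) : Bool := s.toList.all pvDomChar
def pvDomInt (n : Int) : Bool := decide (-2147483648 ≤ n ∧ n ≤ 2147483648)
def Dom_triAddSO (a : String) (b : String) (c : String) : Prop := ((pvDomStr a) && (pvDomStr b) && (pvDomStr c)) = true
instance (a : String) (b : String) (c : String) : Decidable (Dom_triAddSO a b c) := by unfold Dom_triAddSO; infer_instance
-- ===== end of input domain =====

-- B replaces A's branch-plus-recursion trit folding by a closed-form sum: total = x+y+z, digit = ((total+1) mod 3)-1, carry = (total+1) div 3 (simpler).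
-- ===== PORT A =====
def pvSymA : PySem.Dict String Int := PySem.Dict.ofList [("-", -1), ("0", 0), ("+", 1)]
def pvMysA : PySem.Dict Int String := PySem.Dict.ofList [(-1, "-"), (0, "0"), (1, "+")]

-- literal port of A; Python raises KeyError on a non-trit argument, so getD's default
-- is never reached inside Pre_triAddSO (those inputs are excluded by Pre_).
def triAddSO (a : String) (b : String) (c : String) : String × String :=
  let x := pvSymA.getD a 0
  let y := pvSymA.getD b 0
  let z := pvSymA.getD c 0
  let oc := if x = y then (pvMysA.getD (-y) "0", pvMysA.getD x "0")
            else (pvMysA.getD (x + y) "0", "0")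
  if _h : z ≠ 0 then
    let r1 := triAddSO oc.1 c "0"
    let r2 := triAddSO oc.2 r1.1 "0"
    (r2.2, r1.2)
  else (oc.2, oc.1)
termination_by (if c = "0" then 0 else 1)
decreasing_by
  all_goals
    have hc : c ≠ "0" := by
      intro hc0; subst hc0; exact _h (by decide)
    simp [hc]

-- ===== PORT B =====
def pvSymB : PySem.Dict String Int := PySem.Dict.ofList [("-", -1), ("0", 0), ("+", 1)]
def pvMysB : PySem.Dict Int String := PySem.Dict.ofList [(-1, "-"), (0, "0"), (1, "+")]

def triAddSO_alt (a : String) (b : String) (c : String) : String × String :=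
  let total := pvSymB.getD a 0 + pvSymB.getD b 0 + pvSymB.getD c 0
  (pvMysB.getD (PySem.Int.floordiv (total + 1) 3) "0",
   pvMysB.getD (PySem.Int.mod (total + 1) 3 - 1) "0")

-- ===== PRECONDITION & SPEC =====
-- Pre_ excludes exactly the inputs where Python A raises KeyError (any argument not a trit symbol).
def Pre_triAddSO (a : String) (b : String) (c : String) : Prop :=
  a ∈ ["-", "0", "+"] ∧ b ∈ ["-", "0", "+"] ∧ c ∈ ["-", "0", "+"]
instance (a : String) (b : String) (c : String) : Decidable (Pre_triAddSO a b c) := by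
  unfold Pre_triAddSO; infer_instance
def pvWitness_triAddSO : String × String × String := ("+", "+", "-")

def Spec_triAddSO (a : String) (b : String) (c : String) (out : String × String) : Prop := out = triAddSO_alt a b c
instance (a : String) (b : String) (c : String) (out : String × String) : Decidable (Spec_triAddSO a b c out) := by unfold Spec_triAddSO; infer_instance

-- ===== CLAIM (what is proved, stated in full; the proofs are below) =====
def Claim_equal_triAddSO : Prop := ∀ (a : String) (b : String) (c : String), Dom_triAddSO a b c → Pre_triAddSO a b c → Spec_triAddSO a b c (triAddSO a b c)

-- ===== LEMMAS AND PROOFS =====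
-- one unfolding of A's recursion when the third trit is '0' (the non-recursive branch)
theorem triAddSO_zero (a b : String) :
    triAddSO a b "0" =
      ((if pvSymA.getD a 0 = pvSymA.getD b 0
          then (pvMysA.getD (-(pvSymA.getD b 0)) "0", pvMysA.getD (pvSymA.getD a 0) "0")
          else (pvMysA.getD (pvSymA.getD a 0 + pvSymA.getD b 0) "0", "0")).2,
       (if pvSymA.getD a 0 = pvSymA.getD b 0
          then (pvMysA.getD (-(pvSymA.getD b 0)) "0", pvMysA.getD (pvSymA.getD a 0) "0")
          else (pvMysA.getD (pvSymA.getD a 0 + pvSymA.getD b 0) "0", "0")).1) := by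
  have h0 : (PySem.Dict.ofList [("-", (-1 : Int)), ("0", 0), ("+", 1)]).getD "0" 0 = 0 := by decide
  rw [triAddSO]
  simp [pvSymA, h0]

-- ===== VERDICT (by name: the statement is the Claim_ definition above) =====
theorem triAddSO_spec : Claim_equal_triAddSO := by
  intro a b c _ hpre
  obtain ⟨ha, hb, hc⟩ := hpre
  unfold Spec_triAddSO
  simp only [List.mem_cons, List.not_mem_nil, or_false] at ha hb hc
  rcases ha with rfl | rfl | rfl <;> rcases hb with rfl | rfl | rfl <;>
    rcases hc with rfl | rfl | rfl <;>
    (rw [triAddSO]) <;> simp only [triAddSO_zero] <;> decide
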